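-- pv_equiv track=rewrite | github.com/relixiaobo/computer-pilot | tests/agent/run.py | _extract_cu_commands
-- ===== SOURCE A (Python) =====
-- def _extract_cu_commands(text: str) -> list[str]:
--     """Extract cu commands from LLM response, handling multi-line scripts in quotes."""
--     commands = []
--     lines = text.split('\n')
--     i = 0
--     while i < len(lines):
--         line = lines[i].strip().strip('`')
--         if line.startswith('cu '):
--             # Check if this line has an unclosed single quote (multi-line script)
--             if line.count("'") % 2 == 1:
--                 # Collect lines until closing quote
--                 multi = [line]
--                 i += 1
--                 while i < len(lines):
--                     next_line = lines[i].rstrip()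
--                     # Strip leading ``` or backticks
--                     if next_line.strip().startswith('`'):
--                         next_line = next_line.strip().strip('`')
--                     multi.append(next_line)
--                     if "'" in next_line:
--                         break
--                     i += 1
--                 commands.append('\n'.join(multi))
--             else:
--                 commands.append(line)
--         i += 1
--     return commands
-- ===== SOURCE B (Python) =====
-- def _extract_cu_commands(text: str) -> list[str]:
--     """Single flat pass over the lines with an optional collecting buffer as state."""
--     commands = []
--     multi = None  # buffer of a multi-line command being collected, else None
--     for raw in text.split('\n'):
--         if multi is None:
--             line = raw.strip().strip('`')
--             if line.startswith('cu '):
--                 if line.count("'") % 2 == 1: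
--                     multi = [line]
--                 else:
--                     commands.append(line)
--         else:
--             nl = raw.rstrip()
--             if nl.strip().startswith('`'):
--                 nl = nl.strip().strip('`')
--             multi.append(nl)
--             if "'" in nl:
--                 commands.append('\n'.join(multi))
--                 multi = None
--     if multi is not None:
--         commands.append('\n'.join(multi))
--     return commands
-- ===== Notes on version B (the rewrite author's own statement) =====
-- stated objective: simpler
-- what changed: Replaced the nested while loops sharing a mutated index i with one flat for-loop over the lines driven by an optional collecting buffer (state machine), flushing an unclosed buffer after the loop.
import Mathlib
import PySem

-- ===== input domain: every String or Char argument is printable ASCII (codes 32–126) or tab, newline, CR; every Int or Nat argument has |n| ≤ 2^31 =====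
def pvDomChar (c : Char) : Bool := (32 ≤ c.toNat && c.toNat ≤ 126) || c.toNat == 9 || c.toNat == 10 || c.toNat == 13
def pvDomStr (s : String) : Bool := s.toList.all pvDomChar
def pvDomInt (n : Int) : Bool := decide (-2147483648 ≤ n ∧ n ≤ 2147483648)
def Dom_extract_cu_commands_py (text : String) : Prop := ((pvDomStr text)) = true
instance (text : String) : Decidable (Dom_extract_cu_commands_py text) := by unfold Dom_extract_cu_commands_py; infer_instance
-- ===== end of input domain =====

-- B replaces A's nested while loops sharing index i by one flat loop with an optional collecting buffer (simpler); same return value on all inputs.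

-- ===== PORT A =====
-- line = lines[i].strip().strip('`')
def pvCleanA (s : String) : String := PySem.Str.stripChars (PySem.Str.strip s) "`"

-- continuation line: rstrip, then strip().strip('`') if it starts with a backtick
def pvContA (s : String) : String :=
  let nl := PySem.Str.rstrip s
  if PySem.Str.startswith (PySem.Str.strip nl) "`" then
    PySem.Str.stripChars (PySem.Str.strip nl) "`"
  else nl

-- inner while loop: returns (multi, remaining lines after the break line)
def pvCollectA : List String → List String → (List String × List String)
  | [], multi => (multi, [])
  | l :: rest, multi =>
      let nl := pvContA l
      if PySem.Str.isIn "'" nl then (multi ++ [nl], rest)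
      else pvCollectA rest (multi ++ [nl])

theorem pvCollectA_len : ∀ (lines multi : List String),
    (pvCollectA lines multi).2.length ≤ lines.length := by
  intro lines
  induction lines with
  | nil => intro multi; simp [pvCollectA]
  | cons l rest ih =>
      intro multi
      simp only [pvCollectA]
      split
      · simp
      · exact le_trans (ih _) (Nat.le_succ _)

-- outer while loop
def pvGoA : List String → List String
  | [] => []
  | l :: rest =>
      let line := pvCleanA l
      if PySem.Str.startswith line "cu " then
        if PySem.Str.count line "'" % 2 == 1 then
          let p := pvCollectA rest [line]
          PySem.Str.join "\n" p.1 :: pvGoA p.2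
        else line :: pvGoA rest
      else pvGoA rest
termination_by l => l.length
decreasing_by
  · exact Nat.lt_succ_of_le (pvCollectA_len rest [pvCleanA l])
  · simp
  · simp

-- text.split('\n'): sep "\n" ≠ "", so split? is always `some`; getD [] is exact
def extract_cu_commands_py (text : String) : List String :=
  pvGoA ((PySem.Str.split? text "\n").getD [])

-- ===== PORT B =====
def pvCleanB (s : String) : String := PySem.Str.stripChars (PySem.Str.strip s) "`"

def pvContB (s : String) : String :=
  let nl := PySem.Str.rstrip s
  if PySem.Str.startswith (PySem.Str.strip nl) "`" then
    PySem.Str.stripChars (PySem.Str.strip nl) "`"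
  else nl

-- one step of the flat loop; state = (commands so far, optional multi buffer)
def pvStepB : List String × Option (List String) → String → List String × Option (List String)
  | (acc, none), raw =>
      let line := pvCleanB raw
      if PySem.Str.startswith line "cu " then
        if PySem.Str.count line "'" % 2 == 1 then (acc, some [line])
        else (acc ++ [line], none)
      else (acc, none)
  | (acc, some multi), raw =>
      let nl := pvContB raw
      if PySem.Str.isIn "'" nl then (acc ++ [PySem.Str.join "\n" (multi ++ [nl])], none)
      else (acc, some (multi ++ [nl]))

-- flush a still-open buffer after the loop
def pvFinishB : List String × Option (List String) → List String
  | (acc, none) => acc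
  | (acc, some multi) => acc ++ [PySem.Str.join "\n" multi]

def extract_cu_commands_py_alt (text : String) : List String :=
  pvFinishB (((PySem.Str.split? text "\n").getD []).foldl pvStepB ([], none))

-- ===== PRECONDITION & SPEC =====
def Spec_extract_cu_commands_py (text : String) (out : List String) : Prop := out = extract_cu_commands_py_alt text
instance (text : String) (out : List String) : Decidable (Spec_extract_cu_commands_py text out) := by unfold Spec_extract_cu_commands_py; infer_instance

-- ===== CLAIM (what is proved, stated in full; the proofs are below) =====
def Claim_equal_extract_cu_commands_py : Prop := ∀ (text : String), Dom_extract_cu_commands_py text → Spec_extract_cu_commands_py text (extract_cu_commands_py text)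

-- ===== LEMMAS AND PROOFS =====

-- while B is collecting, the flat fold does exactly what A's inner loop computes
theorem pvFold_collect : ∀ (lines multi acc : List String),
    pvFinishB (lines.foldl pvStepB (acc, some multi)) =
      pvFinishB ((pvCollectA lines multi).2.foldl pvStepB
        (acc ++ [PySem.Str.join "\n" (pvCollectA lines multi).1], none)) := by
  intro lines
  induction lines with
  | nil => intro multi acc; simp [pvCollectA, pvFinishB]
  | cons l rest ih =>
      intro multi acc
      simp only [List.foldl_cons, pvStepB]
      rw [show pvContB l = pvContA l from rfl]
      simp only [pvCollectA]
      by_cases h : PySem.Str.isIn "'" (pvContA l) = true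
      · simp only [h, if_pos]
      · simp only [h, if_neg, Bool.false_eq_true, not_false_eq_true]
        exact ih _ acc

-- the flat fold from the normal state computes A's outer loop
theorem pvFold_go : ∀ (lines acc : List String),
    pvFinishB (lines.foldl pvStepB (acc, none)) = acc ++ pvGoA lines := by
  intro lines
  induction lines using pvGoA.induct with
  | case1 => intro acc; simp [pvFinishB, pvGoA]
  | case2 l rest line hcu hodd p ih =>
      intro acc
      simp only [List.foldl_cons, pvStepB]
      rw [show pvCleanB l = line from rfl, if_pos hcu, if_pos hodd]
      rw [pvFold_collect rest [line] acc, ih]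
      simp only [pvGoA]
      rw [if_pos hcu, if_pos hodd]
      simp [p]
      exact ⟨rfl, rfl⟩
  | case3 l rest line hcu hodd ih =>
      intro acc
      simp only [List.foldl_cons, pvStepB]
      rw [show pvCleanB l = line from rfl, if_pos hcu, if_neg hodd]
      rw [ih]
      simp only [pvGoA]
      rw [if_pos hcu, if_neg hodd]
      simp
      rfl
  | case4 l rest line hcu ih =>
      intro acc
      simp only [List.foldl_cons, pvStepB]
      rw [show pvCleanB l = line from rfl, if_neg hcu]
      rw [ih]
      simp only [pvGoA]
      rw [if_neg hcu]

-- ===== VERDICT (by name: the statement is the Claim_ definition above) =====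
theorem extract_cu_commands_py_spec : Claim_equal_extract_cu_commands_py := by
  intro text _
  unfold Spec_extract_cu_commands_py extract_cu_commands_py extract_cu_commands_py_alt
  rw [pvFold_go]
  rfl
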